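-- pv_equiv track=rewrite | github.com/anhminhbo/IntroToProgramming | Week10/alice_words.py | find_longest_word_in_dict
-- ===== SOURCE A (Python) =====
-- def find_longest_word_in_dict(word_dict):
--     maximum_length = 0
--     longest_word = ""
--     for word in word_dict:
--         if maximum_length < len(word):
--             maximum_length = len(word)
--             longest_word = word
--     return longest_word
-- ===== SOURCE B (Python) =====
-- def find_longest_word_in_dict(word_dict):
--     target = max((len(w) for w in word_dict), default=0)
--     return next((w for w in word_dict if len(w) == target), "")
-- ===== Notes on version B (the rewrite author's own statement) =====
-- stated objective: alternative
-- what changed: Replaces the single running-max scan carrying two pieces of state with two shaped passes: first compute the maximum key length, then return the first key of that length (falling back to "" for the empty dict).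
import Mathlib
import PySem

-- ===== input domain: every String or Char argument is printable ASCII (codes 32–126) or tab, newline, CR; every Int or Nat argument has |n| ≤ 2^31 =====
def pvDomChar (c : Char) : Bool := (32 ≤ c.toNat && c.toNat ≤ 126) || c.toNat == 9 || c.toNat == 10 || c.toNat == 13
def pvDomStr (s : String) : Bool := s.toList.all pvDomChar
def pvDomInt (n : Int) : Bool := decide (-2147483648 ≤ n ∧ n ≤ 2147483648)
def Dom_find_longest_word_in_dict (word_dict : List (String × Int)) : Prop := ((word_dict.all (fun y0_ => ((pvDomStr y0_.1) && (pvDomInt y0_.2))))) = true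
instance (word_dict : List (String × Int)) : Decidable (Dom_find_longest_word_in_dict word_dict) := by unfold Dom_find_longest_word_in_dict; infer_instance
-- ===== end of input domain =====

-- ===== PORT A =====
-- One honest line: B finds the max key length first, then the first key of that length — a
-- different two-pass decomposition of the same task (objective: alternative).
def find_longest_word_in_dict (word_dict : List (String × Int)) : String :=
  (word_dict.foldl
    (fun (st : Int × String) kv =>
      if st.1 < PySem.Str.len kv.1 then (PySem.Str.len kv.1, kv.1) else st)
    (0, "")).2

-- ===== PORT B =====
-- target = max((len(w) for w in word_dict), default=0)
def pvMaxLen (word_dict : List (String × Int)) : Int :=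
  word_dict.foldl (fun m kv => max m (PySem.Str.len kv.1)) 0

-- next((w for w in word_dict if len(w) == target), "")
def pvFirstWithLen (word_dict : List (String × Int)) (target : Int) : String :=
  match word_dict with
  | [] => ""
  | kv :: rest => if PySem.Str.len kv.1 = target then kv.1 else pvFirstWithLen rest target

def find_longest_word_in_dict_alt (word_dict : List (String × Int)) : String :=
  pvFirstWithLen word_dict (pvMaxLen word_dict)

-- ===== PRECONDITION & SPEC =====
def Spec_find_longest_word_in_dict (word_dict : List (String × Int)) (out : String) : Prop := out = find_longest_word_in_dict_alt word_dict
instance (word_dict : List (String × Int)) (out : String) : Decidable (Spec_find_longest_word_in_dict word_dict out) := by unfold Spec_find_longest_word_in_dict; infer_instance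

-- ===== CLAIM (what is proved, stated in full; the proofs are below) =====
def Claim_equal_find_longest_word_in_dict : Prop := ∀ (word_dict : List (String × Int)), Dom_find_longest_word_in_dict word_dict → Spec_find_longest_word_in_dict word_dict (find_longest_word_in_dict word_dict)

-- ===== LEMMAS AND PROOFS =====

-- The fold over `max` from seed m : running maximum.
def pvMaxFrom (word_dict : List (String × Int)) (m : Int) : Int :=
  word_dict.foldl (fun m kv => max m (PySem.Str.len kv.1)) m

theorem pvMaxFrom_ge (d : List (String × Int)) (m : Int) : m ≤ pvMaxFrom d m := by
  induction d generalizing m with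
  | nil => exact le_refl m
  | cons kv rest ih => exact le_trans (le_max_left _ _) (ih (max m (PySem.Str.len kv.1)))

-- Invariant of A's running-max fold: starting from state (m, w), the final word is w if no
-- later key beats m, and otherwise the first key whose length equals the overall maximum.
theorem pvFoldA_eq (d : List (String × Int)) (m : Int) (w : String) :
    (d.foldl
      (fun (st : Int × String) kv =>
        if st.1 < PySem.Str.len kv.1 then (PySem.Str.len kv.1, kv.1) else st)
      (m, w)).2 =
    if pvMaxFrom d m = m then w else pvFirstWithLen d (pvMaxFrom d m) := by
  induction d generalizing m w with
  | nil => simp [pvMaxFrom]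
  | cons kv rest ih =>
    by_cases h : m < PySem.Str.len kv.1
    · have hM : pvMaxFrom (kv :: rest) m = pvMaxFrom rest (PySem.Str.len kv.1) := by
        show pvMaxFrom rest (max m (PySem.Str.len kv.1)) = _
        rw [max_eq_right h.le]
      have hge := pvMaxFrom_ge rest (PySem.Str.len kv.1)
      have hne : pvMaxFrom (kv :: rest) m ≠ m := by omega
      rw [hM] at hne
      rw [List.foldl_cons, if_pos h, ih, hM, if_neg hne]
      rcases eq_or_ne (pvMaxFrom rest (PySem.Str.len kv.1)) (PySem.Str.len kv.1) with hl | hl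
      · rw [if_pos hl, pvFirstWithLen, if_pos hl.symm]
      · rw [if_neg hl, pvFirstWithLen, if_neg (Ne.symm hl)]
    · have hM : pvMaxFrom (kv :: rest) m = pvMaxFrom rest m := by
        show pvMaxFrom rest (max m (PySem.Str.len kv.1)) = _
        rw [max_eq_left (not_lt.mp h)]
      have hge := pvMaxFrom_ge rest m
      rw [List.foldl_cons, if_neg h, ih, hM]
      rcases eq_or_ne (pvMaxFrom rest m) m with hm | hm
      · rw [if_pos hm, if_pos hm]
      · have hlm : PySem.Str.len kv.1 ≤ m := not_lt.mp h
        have hl : PySem.Str.len kv.1 ≠ pvMaxFrom rest m := by omega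
        rw [if_neg hm, if_neg hm, pvFirstWithLen, if_neg hl]

theorem pvLen_zero (s : String) (h : PySem.Str.len s = 0) : s = "" := by
  simp [PySem.Str.len_eq] at h
  cases s; simp_all

-- ===== VERDICT (by name: the statement is the Claim_ definition above) =====
theorem find_longest_word_in_dict_spec : Claim_equal_find_longest_word_in_dict := by
  intro d _
  show _ = _
  rw [find_longest_word_in_dict, find_longest_word_in_dict_alt, pvFoldA_eq]
  have hMm : pvMaxLen d = pvMaxFrom d 0 := rfl
  by_cases h0 : pvMaxFrom d 0 = 0
  · rw [if_pos h0, hMm, h0]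
    cases d with
    | nil => rfl
    | cons kv rest =>
      have h1 : PySem.Str.len kv.1 ≤ pvMaxFrom (kv :: rest) 0 :=
        le_trans (le_max_right 0 _) (pvMaxFrom_ge rest _)
      have h2 : 0 ≤ PySem.Str.len kv.1 := by simp [PySem.Str.len_eq]
      have h3 : PySem.Str.len kv.1 = 0 := by omega
      rw [pvFirstWithLen, if_pos h3, pvLen_zero _ h3]
  · rw [if_neg h0, hMm]
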